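-- pv_equiv track=rewrite | github.com/r1aalstjd/Tetris | GA_MP_Tetris.py | length_block
-- ===== SOURCE A (Python) =====
-- def length_block(block_type): # Returns the horizonal length of a state of a block
--     l = 0
--     for x in range(4):
--         for y in range(4):
--             if block_type[y][x]:
--                 l += 1
--                 break
--     return l
-- ===== SOURCE B (Python) =====
-- def length_block(block_type): # Returns the horizonal length of a state of a block
--     bits = 0
--     for y in range(4):
--         row = block_type[y]
--         for x in range(4):
--             if row[x]:
--                 bits |= 1 << x
--     count = 0
--     while bits:
--         count += bits & 1
--         bits >>= 1
--     return count
-- ===== Notes on version B (the rewrite author's own statement) =====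
-- stated objective: alternative
-- what changed: Encodes column occupancy as a 4-bit integer bitmask built by OR-ing shifted bits row-major, then returns its popcount via a shift-and-mask loop, instead of scanning each column with an early break and counting directly. Pre_ requires a full 4x4 grid, excluding ragged inputs on which A's early break can return a value while B, which reads all 16 cells, raises IndexError.
-- outside the precondition, e.g. on length_block([[1, 1, 1, 1]]): A returns 4, B raises IndexError
import Mathlib
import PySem

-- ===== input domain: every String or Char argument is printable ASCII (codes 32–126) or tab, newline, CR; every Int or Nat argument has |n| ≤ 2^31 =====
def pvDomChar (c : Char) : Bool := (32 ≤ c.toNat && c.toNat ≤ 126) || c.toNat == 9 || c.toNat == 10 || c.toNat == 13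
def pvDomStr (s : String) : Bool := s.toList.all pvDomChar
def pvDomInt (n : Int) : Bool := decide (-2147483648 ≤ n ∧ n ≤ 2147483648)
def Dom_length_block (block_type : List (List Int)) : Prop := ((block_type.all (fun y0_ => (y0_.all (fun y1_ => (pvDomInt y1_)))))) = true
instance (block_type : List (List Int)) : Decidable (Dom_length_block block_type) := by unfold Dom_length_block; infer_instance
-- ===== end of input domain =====

-- B builds a 4-bit column-occupancy bitmask (OR of shifted bits, row-major) and returns
-- its popcount via a shift-and-mask loop, instead of A's column scan with early break.

-- ===== PORT A =====
-- inner 'for y in range(4): if block_type[y][x]: l += 1; break' — returns the column's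
-- contribution (1 at the first truthy cell, else 0); indexing is in range under Pre_.
def lbColA (bt : List (List Int)) (x : Int) : List Int → Int
  | [] => 0
  | y :: ys =>
      if PySem.List.pyGetD (PySem.List.pyGetD bt y []) x 0 ≠ 0 then 1
      else lbColA bt x ys

def length_block (block_type : List (List Int)) : Int :=
  List.foldl (fun l x => l + lbColA block_type x [0, 1, 2, 3]) 0 [0, 1, 2, 3]

-- ===== PORT B =====
-- 'while bits: count += bits & 1; bits >>= 1' — bits is a Python int that is provably
-- nonnegative (built from 0 by OR-ing in nonnegative 1 << x), so Nat represents it exactly.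
def lbPop (bits : Nat) : Int :=
  if bits = 0 then 0
  else ((bits &&& 1 : Nat) : Int) + lbPop (bits >>> 1)
decreasing_by
  simp only [Nat.shiftRight_one]
  omega

-- 'bits |= 1 << x' row-major over the 4x4 grid (indexing in range under Pre_)
def length_block_alt (block_type : List (List Int)) : Int :=
  let bits : Nat :=
    List.foldl (fun bits (y : Int) =>
      let row := PySem.List.pyGetD block_type y []
      List.foldl (fun (bits : Nat) (x : Nat) =>
        if PySem.List.pyGetD row (x : Int) 0 ≠ 0 then bits ||| (1 <<< x) else bits)
        bits [0, 1, 2, 3])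
      0 ([0, 1, 2, 3] : List Int)
  lbPop bits

-- ===== PRECONDITION & SPEC =====
-- Pre_ excludes ragged grids: B reads all 16 cells of the first four rows, so it raises
-- IndexError wherever one is missing, while A's early break can still return there.
def Pre_length_block (block_type : List (List Int)) : Prop :=
  4 ≤ block_type.length ∧ ∀ r ∈ block_type.take 4, 4 ≤ r.length

instance (block_type : List (List Int)) : Decidable (Pre_length_block block_type) := by
  unfold Pre_length_block; infer_instance

def pvWitness_length_block : List (List Int) :=
  [[0, 1, 0, 0], [2, 0, 0, 0], [0, 0, 0, 3], [0, 0, 0, 0]]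

def Spec_length_block (block_type : List (List Int)) (out : Int) : Prop :=
  out = length_block_alt block_type
instance (block_type : List (List Int)) (out : Int) : Decidable (Spec_length_block block_type out) := by
  unfold Spec_length_block; infer_instance

-- ===== CLAIM (what is proved, stated in full; the proofs are below) =====
def Claim_equal_length_block : Prop :=
  ∀ (block_type : List (List Int)), Dom_length_block block_type →
    Pre_length_block block_type → Spec_length_block block_type (length_block block_type)

-- ===== LEMMAS AND PROOFS =====

-- B's popcount loop computes the Python-exact bit count of its (nonnegative) argument
lemma lbPop_eq (n : Nat) : lbPop n = ((PySem.Int.bitCount (n : Int)) : Int) := by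
  induction n using Nat.strong_induction_on with
  | _ n ih =>
    rw [lbPop]
    by_cases h : n = 0
    · subst h; simp [PySem.Int.bitCount_zero]
    · rw [if_neg h, ih (n >>> 1) (by simp only [Nat.shiftRight_one]; omega),
        PySem.Int.bitCount_natCast (Nat.pos_of_ne_zero h)]
      simp only [Nat.shiftRight_one, Nat.and_one_is_mod]
      push_cast; ring

-- one row of B's bit-building fold ORs the row's occupancy mask into the accumulator
lemma row_fold (a b c d : Int) (t : List Int) (bits : Nat) :
    List.foldl (fun (bits : Nat) (x : Nat) =>
        if (a::b::c::d::t)[x]?.getD 0 ≠ 0 then bits ||| (1 <<< x) else bits)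
      bits [0, 1, 2, 3]
    = bits ||| ((if a ≠ 0 then 1 else 0) ||| (if b ≠ 0 then 2 else 0) |||
        (if c ≠ 0 then 4 else 0) ||| (if d ≠ 0 then 8 else 0)) := by
  simp only [List.foldl]
  simp only [List.getElem?_cons_zero, List.getElem?_cons_succ, Option.getD_some]
  split_ifs <;> simp [Nat.or_assoc]

lemma mask_or (b0 b1 b2 b3 c0 c1 c2 c3 : Bool) :
    (((if b0 then 1 else 0) ||| (if b1 then 2 else 0) ||| (if b2 then 4 else 0) ||| (if b3 then 8 else 0) : Nat) |||
     ((if c0 then 1 else 0) ||| (if c1 then 2 else 0) ||| (if c2 then 4 else 0) ||| (if c3 then 8 else 0)))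
    = ((if (b0 || c0) then 1 else 0) ||| (if (b1 || c1) then 2 else 0) |||
       (if (b2 || c2) then 4 else 0) ||| (if (b3 || c3) then 8 else 0)) := by
  revert b0 b1 b2 b3 c0 c1 c2 c3
  decide

lemma pop_mask (b0 b1 b2 b3 : Bool) :
    ((PySem.Int.bitCount ((((if b0 then 1 else 0) ||| (if b1 then 2 else 0) |||
        (if b2 then 4 else 0) ||| (if b3 then 8 else 0) : Nat)) : Int)) : Int)
    = (if b0 then 1 else 0) + (if b1 then 1 else 0) + (if b2 then 1 else 0) + (if b3 then 1 else 0) := by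
  revert b0 b1 b2 b3
  decide

lemma mask_or' (P0 P1 P2 P3 Q0 Q1 Q2 Q3 : Prop)
    [Decidable P0] [Decidable P1] [Decidable P2] [Decidable P3]
    [Decidable Q0] [Decidable Q1] [Decidable Q2] [Decidable Q3] :
    (((if P0 then 1 else 0) ||| (if P1 then 2 else 0) ||| (if P2 then 4 else 0) ||| (if P3 then 8 else 0) : Nat) |||
     ((if Q0 then 1 else 0) ||| (if Q1 then 2 else 0) ||| (if Q2 then 4 else 0) ||| (if Q3 then 8 else 0)))
    = ((if P0 ∨ Q0 then 1 else 0) ||| (if P1 ∨ Q1 then 2 else 0) |||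
       (if P2 ∨ Q2 then 4 else 0) ||| (if P3 ∨ Q3 then 8 else 0)) := by
  have := mask_or (decide P0) (decide P1) (decide P2) (decide P3)
    (decide Q0) (decide Q1) (decide Q2) (decide Q3)
  simpa using this

lemma pop_mask' (P0 P1 P2 P3 : Prop)
    [Decidable P0] [Decidable P1] [Decidable P2] [Decidable P3] :
    ((PySem.Int.bitCount ((((if P0 then 1 else 0) ||| (if P1 then 2 else 0) |||
        (if P2 then 4 else 0) ||| (if P3 then 8 else 0) : Nat)) : Int)) : Int)
    = (if P0 then 1 else 0) + (if P1 then 1 else 0) + (if P2 then 1 else 0) + (if P3 then 1 else 0) := by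
  have := pop_mask (decide P0) (decide P1) (decide P2) (decide P3)
  simpa using this

-- A's early-break column scan is the indicator of "some cell in the column is truthy"
lemma col_eq' (P0 P1 P2 P3 : Prop)
    [Decidable P0] [Decidable P1] [Decidable P2] [Decidable P3] :
    (if P0 then (1 : Int) else if P1 then 1 else if P2 then 1 else if P3 then 1 else 0)
    = if ((P0 ∨ P1) ∨ P2) ∨ P3 then 1 else 0 := by
  by_cases h0 : P0 <;> by_cases h1 : P1 <;> by_cases h2 : P2 <;> by_cases h3 : P3 <;>
    simp [h0, h1, h2, h3]

-- the equivalence on a fully destructured 4x4 grid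
lemma grid_eq (a00 a01 a02 a03 a10 a11 a12 a13 a20 a21 a22 a23 a30 a31 a32 a33 : Int)
    (t0 t1 t2 t3 : List Int) (t : List (List Int)) :
    length_block ((a00::a01::a02::a03::t0)::(a10::a11::a12::a13::t1)::(a20::a21::a22::a23::t2)::(a30::a31::a32::a33::t3)::t)
      = length_block_alt ((a00::a01::a02::a03::t0)::(a10::a11::a12::a13::t1)::(a20::a21::a22::a23::t2)::(a30::a31::a32::a33::t3)::t) := by
  unfold length_block length_block_alt
  conv_rhs => rw [List.foldl_cons, List.foldl_cons, List.foldl_cons, List.foldl_cons, List.foldl_nil]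
  simp only [PySem.List.pyGetD_natCast, PySem.List.pyGetD_ofNat', List.getD,
    List.getElem?_cons_zero, List.getElem?_cons_succ, Option.getD_some]
  rw [row_fold, row_fold, row_fold, row_fold, lbPop_eq]
  simp only [Nat.zero_or]
  rw [mask_or', mask_or', mask_or', pop_mask']
  simp only [List.foldl, lbColA]
  simp only [PySem.List.pyGetD_ofNat', List.getD,
    List.getElem?_cons_zero, List.getElem?_cons_succ, Option.getD_some]
  rw [col_eq', col_eq', col_eq', col_eq']
  ring

-- ===== VERDICT (by name: the statement is the Claim_ definition above) =====
theorem length_block_spec : Claim_equal_length_block := by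
  intro bt _ hpre
  obtain ⟨hlen, hrows⟩ := hpre
  rcases bt with _ | ⟨r0, bt⟩; · simp at hlen
  rcases bt with _ | ⟨r1, bt⟩; · simp at hlen
  rcases bt with _ | ⟨r2, bt⟩; · simp at hlen
  rcases bt with _ | ⟨r3, t⟩; · simp at hlen
  have h0 : 4 ≤ r0.length := hrows r0 (by simp)
  have h1 : 4 ≤ r1.length := hrows r1 (by simp)
  have h2 : 4 ≤ r2.length := hrows r2 (by simp)
  have h3 : 4 ≤ r3.length := hrows r3 (by simp)
  rcases r0 with _ | ⟨a00, r0⟩; · simp at h0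
  rcases r0 with _ | ⟨a01, r0⟩; · simp at h0
  rcases r0 with _ | ⟨a02, r0⟩; · simp at h0
  rcases r0 with _ | ⟨a03, t0⟩; · simp at h0
  rcases r1 with _ | ⟨a10, r1⟩; · simp at h1
  rcases r1 with _ | ⟨a11, r1⟩; · simp at h1
  rcases r1 with _ | ⟨a12, r1⟩; · simp at h1
  rcases r1 with _ | ⟨a13, t1⟩; · simp at h1
  rcases r2 with _ | ⟨a20, r2⟩; · simp at h2
  rcases r2 with _ | ⟨a21, r2⟩; · simp at h2
  rcases r2 with _ | ⟨a22, r2⟩; · simp at h2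
  rcases r2 with _ | ⟨a23, t2⟩; · simp at h2
  rcases r3 with _ | ⟨a30, r3⟩; · simp at h3
  rcases r3 with _ | ⟨a31, r3⟩; · simp at h3
  rcases r3 with _ | ⟨a32, r3⟩; · simp at h3
  rcases r3 with _ | ⟨a33, t3⟩; · simp at h3
  exact grid_eq a00 a01 a02 a03 a10 a11 a12 a13 a20 a21 a22 a23 a30 a31 a32 a33 t0 t1 t2 t3 t
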